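-- pv_equiv track=rewrite | github.com/Of-Arte/Crypt-Workspace | engine.py | build_table
-- ===== SOURCE A (Python) =====
-- import string
-- from typing import List, Optional, Tuple, Dict, Any
--
-- def build_table(alphabet: Optional[List[str]] = None, shift: int = 1) -> List[List[str]]:
--     """
--     Makes a Vigenère “table”: rows match alphabet length, shifted left 'shift' times each row.
--     """
--     if alphabet is None:
--         alphabet = list(string.ascii_uppercase)
--
--     array = list(alphabet)[:]
--     table = []
--     # Table height matches alphabet length
--     for i in range(len(alphabet)):
--         table.append(array[:])
--         # Shift the array 'shift' times
--         for _ in range(shift):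
--             array.append(array.pop(0))
--     return table
-- ===== SOURCE B (Python) =====
-- import string
--
-- def build_table(alphabet=None, shift=1):
--     """Vigenere table via slicing a doubled array at offset (i*shift) % n per row."""
--     if alphabet is None:
--         alphabet = list(string.ascii_uppercase)
--     arr = list(alphabet)
--     n = len(arr)
--     if n == 0:
--         return []
--     doubled = arr + arr
--     s = max(shift, 0)
--     return [doubled[(i * s) % n:(i * s) % n + n] for i in range(n)]
-- ===== Notes on version B (the rewrite author's own statement) =====
-- stated objective: faster
-- what changed: Replaces the per-row repeated pop(0)/append rotation (shift single-element rotations per row) by slicing a precomputed doubled array at offset (i*shift) % n for each row; intended as faster (O(n^2) vs O(n^2*shift)); a timing run measured B 5.8-12.2x faster at n=256-1024 and could not confirm at the largest sizes, where the quadratic-size output makes both runs exceed the harness limit.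
import Mathlib
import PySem

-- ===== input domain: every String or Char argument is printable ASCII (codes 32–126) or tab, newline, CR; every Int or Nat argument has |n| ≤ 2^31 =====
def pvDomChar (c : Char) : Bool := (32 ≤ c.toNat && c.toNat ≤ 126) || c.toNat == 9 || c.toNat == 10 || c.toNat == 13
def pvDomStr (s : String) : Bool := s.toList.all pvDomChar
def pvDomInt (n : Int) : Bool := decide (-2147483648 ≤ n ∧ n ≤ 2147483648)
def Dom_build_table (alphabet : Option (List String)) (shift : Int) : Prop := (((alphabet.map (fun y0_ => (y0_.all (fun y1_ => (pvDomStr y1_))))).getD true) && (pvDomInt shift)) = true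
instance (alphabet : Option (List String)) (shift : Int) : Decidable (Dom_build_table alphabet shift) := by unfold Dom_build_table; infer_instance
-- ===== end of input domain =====

-- B replaces A's per-row repeated pop(0)/append single-step rotations by slicing a
-- precomputed doubled array at offset (i*shift) % n; intended as faster (drops the
-- factor shift); a timing run measured 5.8-12.2x at n=256-1024 but could not
-- confirm at the largest sizes, where the quadratic output exceeds the harness limit.

-- list(string.ascii_uppercase), used by both programs for the None default
def asciiUppercaseList : List String :=
  ["A", "B", "C", "D", "E", "F", "G", "H", "I", "J", "K", "L", "M",
   "N", "O", "P", "Q", "R", "S", "T", "U", "V", "W", "X", "Y", "Z"]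

-- ===== PORT A =====
-- array.append(array.pop(0)); pop(0) raises only on an empty array, which the loop
-- never reaches (the outer loop runs 0 times when the alphabet is empty): the
-- 'none' branch is unreachable.
def rotOnce (a : List String) : List String :=
  match PySem.List.pop? a 0 with
  | some (x, rest) => rest ++ [x]
  | none => a

def build_table (alphabet : Option (List String)) (shift : Int) : List (List String) :=
  let alpha := match alphabet with
    | none => asciiUppercaseList
    | some a => a
  let array := alpha            -- list(alphabet)[:]
  let st := (PySem.List.pyRange 0 (alpha.length : Int) 1).foldl
    (fun (st : List String × List (List String)) _ =>
      let table := st.2 ++ [st.1]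
      let array := (PySem.List.pyRange 0 shift 1).foldl (fun a _ => rotOnce a) st.1
      (array, table))
    (array, [])
  st.2

-- ===== PORT B =====
def build_table_alt (alphabet : Option (List String)) (shift : Int) : List (List String) :=
  let arr := match alphabet with
    | none => asciiUppercaseList
    | some a => a
  let n := arr.length
  if n = 0 then []
  else
    let doubled := arr ++ arr
    let s := max shift 0
    (PySem.List.pyRange 0 (n : Int) 1).map (fun i =>
      PySem.List.slice doubled (some (PySem.Int.mod (i * s) (n : Int)))
        (some (PySem.Int.mod (i * s) (n : Int) + (n : Int))))

-- ===== PRECONDITION & SPEC =====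
def Spec_build_table (alphabet : Option (List String)) (shift : Int) (out : List (List String)) : Prop := out = build_table_alt alphabet shift
instance (alphabet : Option (List String)) (shift : Int) (out : List (List String)) : Decidable (Spec_build_table alphabet shift out) := by unfold Spec_build_table; infer_instance

-- ===== CLAIM (what is proved, stated in full; the proofs are below) =====
def Claim_equal_build_table : Prop := ∀ (alphabet : Option (List String)) (shift : Int), Dom_build_table alphabet shift → Spec_build_table alphabet shift (build_table alphabet shift)

-- ===== LEMMAS AND PROOFS =====

theorem rotOnce_eq_rotate (a : List String) : rotOnce a = a.rotate 1 := by
  cases a with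
  | nil => simp [rotOnce, PySem.List.pop?]
  | cons x xs =>
    simp [rotOnce, PySem.List.pop?_zero_cons, List.rotate_cons_succ]

theorem foldl_const_iterate {α β : Type} (f : α → α) (l : List β) (a : α) :
    l.foldl (fun a _ => f a) a = f^[l.length] a := by
  induction l generalizing a with
  | nil => rfl
  | cons x xs ih => simp [List.foldl_cons, ih, Function.iterate_succ_apply]

theorem iterate_rotate (k : Nat) (a : List String) :
    (fun a => rotOnce a)^[k] a = a.rotate k := by
  induction k generalizing a with
  | zero => simp
  | succ m ih =>
    rw [Function.iterate_succ_apply, ih, rotOnce_eq_rotate, List.rotate_rotate]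
    ring_nf

-- characterisation of A's outer loop
theorem outer_loop (n s : Nat) (arr : List String) (t : List (List String)) :
    ((fun (st : List String × List (List String)) =>
        (st.1.rotate s, st.2 ++ [st.1]))^[n] (arr, t)).2
      = t ++ (List.range n).map (fun i => arr.rotate (i * s)) := by
  induction n generalizing arr t with
  | zero => simp
  | succ m ih =>
    rw [Function.iterate_succ_apply, ih]
    rw [List.range_succ_eq_map]
    simp [List.rotate_rotate, Function.comp]
    intro i _; ring_nf

theorem build_table_rows (alpha : List String) (shift : Int) :
    build_table (some alpha) shift
      = (List.range alpha.length).map (fun i => alpha.rotate (i * shift.toNat)) := by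
  show ((PySem.List.pyRange 0 (alpha.length : Int) 1).foldl
      (fun (st : List String × List (List String)) _ =>
        (((PySem.List.pyRange 0 shift 1).foldl (fun a _ => rotOnce a) st.1), st.2 ++ [st.1]))
      (alpha, [])).2 = _
  have hinner : ∀ a : List String,
      (PySem.List.pyRange 0 shift 1).foldl (fun a _ => rotOnce a) a = a.rotate shift.toNat := by
    intro a
    rw [foldl_const_iterate rotOnce, iterate_rotate]
    congr 1
    simp [PySem.List.length_pyRange_one]
  have hfold : ((PySem.List.pyRange 0 (alpha.length : Int) 1).foldl
      (fun (st : List String × List (List String)) _ =>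
        (((PySem.List.pyRange 0 shift 1).foldl (fun a _ => rotOnce a) st.1), st.2 ++ [st.1]))
      (alpha, []))
      = (fun (st : List String × List (List String)) =>
          (st.1.rotate shift.toNat, st.2 ++ [st.1]))^[(PySem.List.pyRange 0 (alpha.length : Int) 1).length] (alpha, []) := by
    rw [← foldl_const_iterate]
    apply List.foldl_ext
    intro st _ _
    simp [hinner st.1]
  rw [hfold, PySem.List.length_pyRange_one]
  rw [outer_loop]
  simp

-- B's row i equals rotation by i*s, for 0 < n and m = (i*s) % n
theorem doubled_slice (arr : List String) (m : Nat) (hm : m ≤ arr.length) :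
    ((arr ++ arr).drop m).take arr.length = arr.drop m ++ arr.take m := by
  rw [List.drop_append_of_le_length hm, List.take_append]
  have h1 : List.take arr.length (arr.drop m) = arr.drop m :=
    List.take_of_length_le (by simp)
  have h2 : arr.length - (arr.drop m).length = m := by simp; omega
  rw [h1, h2]

theorem rotate_eq_slice (arr : List String) (k : Nat) (hn : 0 < arr.length) :
    arr.rotate k
      = PySem.List.slice (arr ++ arr) (some ((k % arr.length : Nat) : Int))
          (some (((k % arr.length : Nat) : Int) + (arr.length : Int))) := by
  rw [PySem.List.slice_natCast_add]
  rw [doubled_slice arr _ (Nat.le_of_lt (Nat.mod_lt _ hn))]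
  rw [← List.rotate_mod]
  exact List.rotate_eq_drop_append_take (Nat.le_of_lt (Nat.mod_lt _ hn))

theorem build_table_core (alpha : List String) (shift : Int) :
    build_table (some alpha) shift = build_table_alt (some alpha) shift := by
  rw [build_table_rows]
  unfold build_table_alt
  simp only []
  split_ifs with h0
  · have : alpha.length = 0 := by exact_mod_cast h0
    simp [this]
  · have hn : 0 < alpha.length := by omega
    rw [PySem.List.pyRange_one, Int.sub_zero, Int.toNat_natCast, List.map_map]
    apply List.map_congr_left
    intro i hi
    simp only [List.mem_range] at hi
    have hmax : max shift 0 = (shift.toNat : Int) := (Int.toNat_eq_max shift).symm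
    have hmul : (0 + (i : Int)) * max shift 0 = ((i * shift.toNat : Nat) : Int) := by
      rw [hmax]; push_cast; ring
    simp only [Function.comp, hmul, PySem.Int.mod_natCast]
    exact rotate_eq_slice alpha (i * shift.toNat) hn

theorem build_table_none (shift : Int) :
    build_table none shift = build_table_alt none shift := by
  have h1 : build_table none shift = build_table (some asciiUppercaseList) shift := rfl
  have h2 : build_table_alt none shift = build_table_alt (some asciiUppercaseList) shift := rfl
  rw [h1, h2, build_table_core]

-- ===== VERDICT (by name: the statement is the Claim_ definition above) =====
theorem build_table_spec : Claim_equal_build_table := by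
  intro alphabet shift _
  unfold Spec_build_table
  cases alphabet with
  | none => exact build_table_none shift
  | some a => exact build_table_core a shift
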